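-- pv_equiv track=rewrite | github.com/amritv0306/queens_problem | tempCodeRunnerFile.py | filter_single_color_blocks
-- ===== SOURCE A (Python) =====
-- def filter_single_color_blocks(colors):
--     N = len(colors)  # Grid size
--     M = len(colors[0])  # Grid width
--
--     # Initialize final answer and visited matrix
--     final_ans = [["_"] * M for _ in range(N)]  # Start with all _
--     visited = [[0] * M for _ in range(N)]
--
--     # Check columns for colors that appear only in one column
--     color_column_count = {}  # Track color appearances per column
--     for col in range(M):
--         for row in range(N):
--             color = colors[row][col]
--             if color not in color_column_count:
--                 color_column_count[color] = set()
--             color_column_count[color].add(col)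
--
--     for color, cols in color_column_count.items():
--         if len(cols) == 1:  # If a color appears in exactly one column
--             target_col = list(cols)[0]
--             for row in range(N):
--                 if colors[row][target_col] != color:
--                     final_ans[row][target_col] = "0"
--                     visited[row][target_col] = 1
--
--     # Check rows for colors that appear only in one row
--     color_row_count = {}  # Track color appearances per row
--     for row in range(N):
--         for col in range(M):
--             color = colors[row][col]
--             if color not in color_row_count:
--                 color_row_count[color] = set()
--             color_row_count[color].add(row)
--
--     for color, rows in color_row_count.items():
--         if len(rows) == 1:  # If a color appears in exactly one row
--             target_row = list(rows)[0]
--             for col in range(M):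
--                 if colors[target_row][col] != color:
--                     final_ans[target_row][col] = "0"
--                     visited[target_row][col] = 1
--
--     return final_ans, visited
-- ===== SOURCE B (Python) =====
-- def _note(d, x, k):
--     # Record that color x was seen at index k; d[x] collapses to None once
--     # x is seen at two different indices.
--     if x in d:
--         if d[x] != k:
--             d[x] = None
--     else:
--         d[x] = k
--
--
-- def filter_single_color_blocks(colors):
--     # One linear sweep records, per color, its unique column and row (or None if
--     # several); one grouping pass per column/row; then every cell is decided
--     # independently. O(N*M) instead of A's per-color column/row rescans.
--     N = len(colors)
--     M = len(colors[0])
--     col_of = {}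
--     row_of = {}
--     for r in range(N):
--         for c in range(M):
--             x = colors[r][c]
--             _note(col_of, x, c)
--             _note(row_of, x, r)
--     col_single = [set() for _ in range(M)]
--     row_single = [set() for _ in range(N)]
--     for x, c in col_of.items():
--         if c is not None:
--             col_single[c].add(x)
--     for x, r in row_of.items():
--         if r is not None:
--             row_single[r].add(x)
--     final_ans = []
--     visited = []
--     for r in range(N):
--         ans_row = []
--         vis_row = []
--         for c in range(M):
--             x = colors[r][c]
--             mark = any(y != x for y in col_single[c]) or any(y != x for y in row_single[r])
--             ans_row.append("0" if mark else "_")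
--             vis_row.append(1 if mark else 0)
--         final_ans.append(ans_row)
--         visited.append(vis_row)
--     return final_ans, visited
-- ===== Notes on version B (the rewrite author's own statement) =====
-- stated objective: faster
-- what changed: B replaces A's per-color column/row rescans (a loop over all distinct colors, each rescanning a full column or row) by one linear sweep recording each color's unique column/row (or None), one pass grouping those colors per column/row, and one per-cell decision.
import Mathlib
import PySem

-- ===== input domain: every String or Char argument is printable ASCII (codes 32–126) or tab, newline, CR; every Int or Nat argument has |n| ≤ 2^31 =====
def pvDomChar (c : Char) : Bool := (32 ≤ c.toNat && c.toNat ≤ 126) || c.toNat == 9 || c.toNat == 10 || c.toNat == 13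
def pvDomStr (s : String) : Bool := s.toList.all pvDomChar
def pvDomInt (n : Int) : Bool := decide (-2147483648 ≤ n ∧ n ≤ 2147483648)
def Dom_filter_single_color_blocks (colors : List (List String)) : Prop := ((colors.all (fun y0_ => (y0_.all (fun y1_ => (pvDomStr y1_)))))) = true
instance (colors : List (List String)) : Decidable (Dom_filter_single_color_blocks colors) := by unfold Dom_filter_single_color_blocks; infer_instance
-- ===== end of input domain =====

-- B replaces A's per-color column/row rescans by one linear sweep recording each color's
-- unique column/row, a grouping pass, and an independent per-cell decision (objective: faster).


-- shared cell accessor: colors[r][c] (total form; Pre_ keeps indices in range)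
def pvCell (colors : List (List String)) (r c : Nat) : String :=
  (colors.getD r []).getD c ""

-- m[r][c] = v (in-place write on a list-of-lists)
def pvSet2 {α : Type} (m : List (List α)) (r c : Nat) (v : α) : List (List α) :=
  m.set r ((m.getD r []).set c v)

-- ===== PORT A =====
def filter_single_color_blocks (colors : List (List String)) : List (List String) × List (List Int) :=
  let N := colors.length
  let M := (colors.getD 0 []).length
  let final0 : List (List String) := List.replicate N (List.replicate M "_")
  let visited0 : List (List Int) := List.replicate N (List.replicate M 0)
  -- color_column_count: 'if color not in d: d[color] = set(); d[color].add(col)'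
  let ccc : PySem.Dict String (PySem.Set Nat) :=
    (List.range M).foldl (fun d col =>
      (List.range N).foldl (fun d row =>
        d.modify (pvCell colors row col) PySem.Set.empty (fun s => PySem.Set.add s col)) d)
      PySem.Dict.empty
  let p1 := ccc.items.foldl (fun (acc : List (List String) × List (List Int)) pr =>
      if pr.2.length = 1 then
        -- list(cols)[0]: the unique element of a singleton set (exact: one element)
        let tc := pr.2.headD 0
        (List.range N).foldl (fun acc row =>
          if pvCell colors row tc ≠ pr.1 then
            (pvSet2 acc.1 row tc "0", pvSet2 acc.2 row tc 1)
          else acc) acc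
      else acc) (final0, visited0)
  let crc : PySem.Dict String (PySem.Set Nat) :=
    (List.range N).foldl (fun d row =>
      (List.range M).foldl (fun d col =>
        d.modify (pvCell colors row col) PySem.Set.empty (fun s => PySem.Set.add s row)) d)
      PySem.Dict.empty
  crc.items.foldl (fun acc pr =>
      if pr.2.length = 1 then
        let tr := pr.2.headD 0
        (List.range M).foldl (fun acc col =>
          if pvCell colors tr col ≠ pr.1 then
            (pvSet2 acc.1 tr col "0", pvSet2 acc.2 tr col 1)
          else acc) acc
      else acc) p1

-- ===== PORT B =====
-- helper _note of Source B
def pvNote (d : PySem.Dict String (Option Nat)) (x : String) (k : Nat) :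
    PySem.Dict String (Option Nat) :=
  if d.contains x then
    (if d.getD x none ≠ some k then d.insert x none else d)
  else d.insert x (some k)

def filter_single_color_blocks_alt (colors : List (List String)) :
    List (List String) × List (List Int) :=
  let N := colors.length
  let M := (colors.getD 0 []).length
  let dicts := (List.range N).foldl
    (fun (p : PySem.Dict String (Option Nat) × PySem.Dict String (Option Nat)) r =>
      (List.range M).foldl (fun p c =>
        let x := pvCell colors r c
        (pvNote p.1 x c, pvNote p.2 x r)) p)
    (PySem.Dict.empty, PySem.Dict.empty)
  let col_single : List (PySem.Set String) := dicts.1.items.foldl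
    (fun ls it =>
      match it.2 with
      | some c => ls.set c (PySem.Set.add (ls.getD c PySem.Set.empty) it.1)
      | none => ls) (List.replicate M PySem.Set.empty)
  let row_single : List (PySem.Set String) := dicts.2.items.foldl
    (fun ls it =>
      match it.2 with
      | some r => ls.set r (PySem.Set.add (ls.getD r PySem.Set.empty) it.1)
      | none => ls) (List.replicate N PySem.Set.empty)
  let rows := (List.range N).map (fun r =>
    let cells := (List.range M).map (fun c =>
      let x := pvCell colors r c
      let mark := (col_single.getD c PySem.Set.empty).any (fun y => y ≠ x)
               || (row_single.getD r PySem.Set.empty).any (fun y => y ≠ x)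
      ((if mark then "0" else "_"), (if mark then (1 : Int) else 0)))
    (cells.map Prod.fst, cells.map Prod.snd))
  (rows.map Prod.fst, rows.map Prod.snd)


-- ===== PRECONDITION & SPEC =====
-- Pre_ excludes exactly the inputs where the Python A raises an IndexError:
-- an empty grid (colors[0] fails), or a row shorter than the first row
-- (colors[row][col] fails); B raises on the same inputs.
def Pre_filter_single_color_blocks (colors : List (List String)) : Prop :=
  colors ≠ [] ∧ ∀ row ∈ colors, (colors.headD []).length ≤ row.length
instance (colors : List (List String)) : Decidable (Pre_filter_single_color_blocks colors) := by
  unfold Pre_filter_single_color_blocks; infer_instance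
def pvWitness_filter_single_color_blocks : List (List String) := [["a", "b"], ["a", "c"]]
def Spec_filter_single_color_blocks (colors : List (List String)) (out : List (List String) × List (List Int)) : Prop := out = filter_single_color_blocks_alt colors
instance (colors : List (List String)) (out : List (List String) × List (List Int)) : Decidable (Spec_filter_single_color_blocks colors out) := by unfold Spec_filter_single_color_blocks; infer_instance

-- ===== CLAIM (what is proved, stated in full; the proofs are below) =====
def Claim_equal_filter_single_color_blocks : Prop := ∀ (colors : List (List String)), Dom_filter_single_color_blocks colors → Pre_filter_single_color_blocks colors → Spec_filter_single_color_blocks colors (filter_single_color_blocks colors)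

-- ===== LEMMAS AND PROOFS =====
-- The equivalence in fact holds for every input of the total Lean ports, so the
-- proofs below do not need Pre_; Pre_ still delimits where port A is faithful to
-- the Python (which raises outside it).
-- ===== basic matrix lemmas =====
theorem pvRowlen_eq {α : Type} (m : List (List α)) (r : Nat) :
    (m.getD r []).length = (m.map List.length).getD r 0 := by
  by_cases h : r < m.length
  · simp [List.getD_eq_getElem?_getD, h]
  · simp [List.getD_eq_getElem?_getD, List.getElem?_eq_none_iff.mpr (by simpa using Nat.le_of_not_lt h),
      (List.getElem?_eq_none_iff (l := m.map List.length)).mpr (by simpa using Nat.le_of_not_lt h)]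

theorem pvSet2_rowlens {α : Type} (m : List (List α)) (r c : Nat) (v : α) :
    (pvSet2 m r c v).map List.length = m.map List.length := by
  unfold pvSet2
  rw [List.map_set]
  apply List.ext_getElem
  · simp
  · intro i h1 h2
    rw [List.getElem_set]
    split_ifs with hi
    · subst hi
      simp only [List.length_map] at h2
      simp [List.getElem_map, List.getD_eq_getElem?_getD, h2]
    · rfl

theorem pvRowlen_congr {α : Type} {F m : List (List α)}
    (h : F.map List.length = m.map List.length) (r : Nat) :
    (F.getD r []).length = (m.getD r []).length := by
  rw [pvRowlen_eq, pvRowlen_eq, h]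

theorem pvLen_congr {α : Type} {F m : List (List α)}
    (h : F.map List.length = m.map List.length) : F.length = m.length := by
  have := congrArg List.length h
  simpa using this

theorem pvEnt_set2 {α : Type} (m : List (List α)) (r' c' r c : Nat) (v d : α)
    (hc : c < (m.getD r []).length) :
    ((pvSet2 m r' c' v).getD r []).getD c d
      = if r = r' ∧ c = c' then v else (m.getD r []).getD c d := by
  unfold pvSet2
  have hr : r < m.length := by
    by_contra h
    rw [List.getD_eq_getElem?_getD, List.getElem?_eq_none_iff.mpr (by simpa using Nat.le_of_not_lt h)] at hc
    simp at hc
  by_cases h1 : r = r'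
  · subst h1
    rw [List.getD_eq_getElem?_getD (l := m.set r ((m.getD r []).set c' v)),
      List.getElem?_set]
    simp only [hr, if_pos]
    by_cases h2 : c = c'
    · subst h2
      rw [List.getD_eq_getElem?_getD] at hc
      simp [List.getD_eq_getElem?_getD, hc]
    · simp [List.getD_eq_getElem?_getD, h2, Ne.symm h2]
  · rw [List.getD_eq_getElem?_getD (l := m.set r' ((m.getD r' []).set c' v)),
      List.getElem?_set]
    simp [Ne.symm h1, h1, List.getD_eq_getElem?_getD]

-- write "w" down a column t at each row i of `rows` whose cell differs from x
theorem pvColWrite_fold {α : Type} (colors : List (List String)) (t : Nat) (x : String) (w : α)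
    (rows : List Nat) :
    ∀ (m : List (List α)),
      ((rows.foldl (fun m i => if pvCell colors i t ≠ x then pvSet2 m i t w else m) m).map List.length
          = m.map List.length)
      ∧ ∀ r c (d : α), c < (m.getD r []).length →
        ((rows.foldl (fun m i => if pvCell colors i t ≠ x then pvSet2 m i t w else m) m).getD r []).getD c d
          = if r ∈ rows ∧ c = t ∧ pvCell colors r t ≠ x then w else (m.getD r []).getD c d := by
  induction rows with
  | nil => intro m; exact ⟨rfl, by intro r c d hc; simp⟩
  | cons i rows ih =>
    intro m
    have hstep : ∀ m' : List (List α),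
        ((i :: rows).foldl (fun m i => if pvCell colors i t ≠ x then pvSet2 m i t w else m) m)
          = rows.foldl (fun m i => if pvCell colors i t ≠ x then pvSet2 m i t w else m)
              (if pvCell colors i t ≠ x then pvSet2 m i t w else m) := by
      intro _; rfl
    rw [hstep m]
    set m' := if pvCell colors i t ≠ x then pvSet2 m i t w else m with hm'
    have hlen : m'.map List.length = m.map List.length := by
      rw [hm']; split_ifs; exacts [pvSet2_rowlens m i t w, rfl]
    obtain ⟨ih1, ih2⟩ := ih m'
    refine ⟨ih1.trans hlen, ?_⟩
    intro r c d hc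
    have hc' : c < (m'.getD r []).length := by rw [pvRowlen_congr hlen]; exact hc
    rw [ih2 r c d hc']
    have hent : (m'.getD r []).getD c d
        = if r = i ∧ c = t ∧ pvCell colors r t ≠ x then w else (m.getD r []).getD c d := by
      rw [hm']
      by_cases h1 : pvCell colors i t ≠ x
      · rw [if_pos h1, pvEnt_set2 m i t r c w d hc]
        by_cases h3 : r = i ∧ c = t
        · rw [if_pos h3, if_pos ⟨h3.1, h3.2, by rw [h3.1]; exact h1⟩]
        · rw [if_neg h3, if_neg (fun hx => h3 ⟨hx.1, hx.2.1⟩)]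
      · rw [if_neg h1, if_neg (fun hx => h1 (by rw [← hx.1]; exact hx.2.2))]
    rw [hent]
    by_cases hmem : r ∈ rows ∧ c = t ∧ pvCell colors r t ≠ x
    · simp [hmem]
    · simp only [if_neg hmem]
      by_cases hhead : r = i ∧ c = t ∧ pvCell colors r t ≠ x
      · simp [hhead]
      · rw [if_neg hhead, if_neg]
        rintro ⟨hr, hct, hne⟩
        rcases List.mem_cons.mp hr with h | h
        · exact hhead ⟨h, hct, hne⟩
        · exact hmem ⟨h, hct, hne⟩

-- write "w" along a row t at each column j of `cols` whose cell differs from x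
theorem pvRowWrite_fold {α : Type} (colors : List (List String)) (t : Nat) (x : String) (w : α)
    (cols : List Nat) :
    ∀ (m : List (List α)),
      ((cols.foldl (fun m j => if pvCell colors t j ≠ x then pvSet2 m t j w else m) m).map List.length
          = m.map List.length)
      ∧ ∀ r c (d : α), c < (m.getD r []).length →
        ((cols.foldl (fun m j => if pvCell colors t j ≠ x then pvSet2 m t j w else m) m).getD r []).getD c d
          = if c ∈ cols ∧ r = t ∧ pvCell colors t c ≠ x then w else (m.getD r []).getD c d := by
  induction cols with
  | nil => intro m; exact ⟨rfl, by intro r c d hc; simp⟩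
  | cons j cols ih =>
    intro m
    have hstep :
        ((j :: cols).foldl (fun m j => if pvCell colors t j ≠ x then pvSet2 m t j w else m) m)
          = cols.foldl (fun m j => if pvCell colors t j ≠ x then pvSet2 m t j w else m)
              (if pvCell colors t j ≠ x then pvSet2 m t j w else m) := rfl
    rw [hstep]
    set m' := if pvCell colors t j ≠ x then pvSet2 m t j w else m with hm'
    have hlen : m'.map List.length = m.map List.length := by
      rw [hm']; split_ifs; exacts [pvSet2_rowlens m t j w, rfl]
    obtain ⟨ih1, ih2⟩ := ih m'
    refine ⟨ih1.trans hlen, ?_⟩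
    intro r c d hc
    have hc' : c < (m'.getD r []).length := by rw [pvRowlen_congr hlen]; exact hc
    rw [ih2 r c d hc']
    have hent : (m'.getD r []).getD c d
        = if c = j ∧ r = t ∧ pvCell colors t c ≠ x then w else (m.getD r []).getD c d := by
      rw [hm']
      by_cases h1 : pvCell colors t j ≠ x
      · rw [if_pos h1, pvEnt_set2 m t j r c w d hc]
        by_cases h3 : r = t ∧ c = j
        · rw [if_pos h3, if_pos ⟨h3.2, h3.1, by rw [h3.2]; exact h1⟩]
        · rw [if_neg h3, if_neg (fun hx => h3 ⟨hx.2.1, hx.1⟩)]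
      · rw [if_neg h1, if_neg (fun hx => h1 (by rw [← hx.1]; exact hx.2.2))]
    rw [hent]
    by_cases hmem : c ∈ cols ∧ r = t ∧ pvCell colors t c ≠ x
    · simp [hmem]
    · simp only [if_neg hmem]
      by_cases hhead : c = j ∧ r = t ∧ pvCell colors t c ≠ x
      · simp [hhead]
      · rw [if_neg hhead, if_neg]
        rintro ⟨hcmem, hrt, hne⟩
        rcases List.mem_cons.mp hcmem with h | h
        · exact hhead ⟨h, hrt, hne⟩
        · exact hmem ⟨h, hrt, hne⟩

-- A's marking pass over dict items, column orientation
theorem pvColPass_fold {α : Type} (colors : List (List String)) (n : Nat) (w : α)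
    (its : List (String × PySem.Set Nat)) :
    ∀ (m : List (List α)),
      ((its.foldl (fun m pr => if pr.2.length = 1 then
          (List.range n).foldl (fun m i => if pvCell colors i (pr.2.headD 0) ≠ pr.1 then pvSet2 m i (pr.2.headD 0) w else m) m
        else m) m).map List.length = m.map List.length)
      ∧ ∀ r c (d : α), c < (m.getD r []).length →
        ((its.foldl (fun m pr => if pr.2.length = 1 then
            (List.range n).foldl (fun m i => if pvCell colors i (pr.2.headD 0) ≠ pr.1 then pvSet2 m i (pr.2.headD 0) w else m) m
          else m) m).getD r []).getD c d
          = if ∃ pr ∈ its, pr.2.length = 1 ∧ r < n ∧ c = pr.2.headD 0 ∧ pvCell colors r c ≠ pr.1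
            then w else (m.getD r []).getD c d := by
  induction its with
  | nil => intro m; exact ⟨rfl, by intro r c d hc; simp⟩
  | cons pr its ih =>
    intro m
    have hstep : ((pr :: its).foldl (fun m pr => if pr.2.length = 1 then
          (List.range n).foldl (fun m i => if pvCell colors i (pr.2.headD 0) ≠ pr.1 then pvSet2 m i (pr.2.headD 0) w else m) m
        else m) m)
        = its.foldl (fun m pr => if pr.2.length = 1 then
          (List.range n).foldl (fun m i => if pvCell colors i (pr.2.headD 0) ≠ pr.1 then pvSet2 m i (pr.2.headD 0) w else m) m
        else m) (if pr.2.length = 1 then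
          (List.range n).foldl (fun m i => if pvCell colors i (pr.2.headD 0) ≠ pr.1 then pvSet2 m i (pr.2.headD 0) w else m) m
        else m) := rfl
    rw [hstep]
    set m' := (if pr.2.length = 1 then
          (List.range n).foldl (fun m i => if pvCell colors i (pr.2.headD 0) ≠ pr.1 then pvSet2 m i (pr.2.headD 0) w else m) m
        else m) with hm'
    have hlen : m'.map List.length = m.map List.length := by
      rw [hm']; split_ifs
      · exact (pvColWrite_fold colors (pr.2.headD 0) pr.1 w (List.range n) m).1
      · rfl
    obtain ⟨ih1, ih2⟩ := ih m'
    refine ⟨ih1.trans hlen, ?_⟩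
    intro r c d hc
    have hc' : c < (m'.getD r []).length := by rw [pvRowlen_congr hlen]; exact hc
    rw [ih2 r c d hc']
    have hent : (m'.getD r []).getD c d
        = if pr.2.length = 1 ∧ r < n ∧ c = pr.2.headD 0 ∧ pvCell colors r c ≠ pr.1
          then w else (m.getD r []).getD c d := by
      rw [hm']
      by_cases hl : pr.2.length = 1
      · rw [if_pos hl, (pvColWrite_fold colors (pr.2.headD 0) pr.1 w (List.range n) m).2 r c d hc]
        by_cases h2 : r ∈ List.range n ∧ c = pr.2.headD 0 ∧ pvCell colors r (pr.2.headD 0) ≠ pr.1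
        · rw [if_pos h2, if_pos ⟨hl, List.mem_range.mp h2.1, h2.2.1, by rw [h2.2.1]; exact h2.2.2⟩]
        · rw [if_neg h2, if_neg (fun hx => h2 ⟨List.mem_range.mpr hx.2.1, hx.2.2.1,
            by rw [← hx.2.2.1]; exact hx.2.2.2⟩)]
      · rw [if_neg hl, if_neg (fun hx => hl hx.1)]
    rw [hent]
    by_cases hmem : ∃ q ∈ its, q.2.length = 1 ∧ r < n ∧ c = q.2.headD 0 ∧ pvCell colors r c ≠ q.1
    · rw [if_pos hmem, if_pos (by obtain ⟨q, hq, hp⟩ := hmem; exact ⟨q, List.mem_cons_of_mem _ hq, hp⟩)]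
    · rw [if_neg hmem]
      by_cases hhead : pr.2.length = 1 ∧ r < n ∧ c = pr.2.headD 0 ∧ pvCell colors r c ≠ pr.1
      · rw [if_pos hhead, if_pos ⟨pr, List.mem_cons_self, hhead⟩]
      · rw [if_neg hhead, if_neg]
        rintro ⟨q, hq, hp⟩
        rcases List.mem_cons.mp hq with h | h
        · exact hhead (h ▸ hp)
        · exact hmem ⟨q, h, hp⟩

-- A's marking pass over dict items, row orientation
theorem pvRowPass_fold {α : Type} (colors : List (List String)) (n : Nat) (w : α)
    (its : List (String × PySem.Set Nat)) :
    ∀ (m : List (List α)),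
      ((its.foldl (fun m pr => if pr.2.length = 1 then
          (List.range n).foldl (fun m j => if pvCell colors (pr.2.headD 0) j ≠ pr.1 then pvSet2 m (pr.2.headD 0) j w else m) m
        else m) m).map List.length = m.map List.length)
      ∧ ∀ r c (d : α), c < (m.getD r []).length →
        ((its.foldl (fun m pr => if pr.2.length = 1 then
            (List.range n).foldl (fun m j => if pvCell colors (pr.2.headD 0) j ≠ pr.1 then pvSet2 m (pr.2.headD 0) j w else m) m
          else m) m).getD r []).getD c d
          = if ∃ pr ∈ its, pr.2.length = 1 ∧ c < n ∧ r = pr.2.headD 0 ∧ pvCell colors r c ≠ pr.1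
            then w else (m.getD r []).getD c d := by
  induction its with
  | nil => intro m; exact ⟨rfl, by intro r c d hc; simp⟩
  | cons pr its ih =>
    intro m
    have hstep : ((pr :: its).foldl (fun m pr => if pr.2.length = 1 then
          (List.range n).foldl (fun m j => if pvCell colors (pr.2.headD 0) j ≠ pr.1 then pvSet2 m (pr.2.headD 0) j w else m) m
        else m) m)
        = its.foldl (fun m pr => if pr.2.length = 1 then
          (List.range n).foldl (fun m j => if pvCell colors (pr.2.headD 0) j ≠ pr.1 then pvSet2 m (pr.2.headD 0) j w else m) m
        else m) (if pr.2.length = 1 then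
          (List.range n).foldl (fun m j => if pvCell colors (pr.2.headD 0) j ≠ pr.1 then pvSet2 m (pr.2.headD 0) j w else m) m
        else m) := rfl
    rw [hstep]
    set m' := (if pr.2.length = 1 then
          (List.range n).foldl (fun m j => if pvCell colors (pr.2.headD 0) j ≠ pr.1 then pvSet2 m (pr.2.headD 0) j w else m) m
        else m) with hm'
    have hlen : m'.map List.length = m.map List.length := by
      rw [hm']; split_ifs
      · exact (pvRowWrite_fold colors (pr.2.headD 0) pr.1 w (List.range n) m).1
      · rfl
    obtain ⟨ih1, ih2⟩ := ih m'
    refine ⟨ih1.trans hlen, ?_⟩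
    intro r c d hc
    have hc' : c < (m'.getD r []).length := by rw [pvRowlen_congr hlen]; exact hc
    rw [ih2 r c d hc']
    have hent : (m'.getD r []).getD c d
        = if pr.2.length = 1 ∧ c < n ∧ r = pr.2.headD 0 ∧ pvCell colors r c ≠ pr.1
          then w else (m.getD r []).getD c d := by
      rw [hm']
      by_cases hl : pr.2.length = 1
      · rw [if_pos hl, (pvRowWrite_fold colors (pr.2.headD 0) pr.1 w (List.range n) m).2 r c d hc]
        by_cases h2 : c ∈ List.range n ∧ r = pr.2.headD 0 ∧ pvCell colors (pr.2.headD 0) c ≠ pr.1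
        · rw [if_pos h2, if_pos ⟨hl, List.mem_range.mp h2.1, h2.2.1, by rw [h2.2.1]; exact h2.2.2⟩]
        · rw [if_neg h2, if_neg (fun hx => h2 ⟨List.mem_range.mpr hx.2.1, hx.2.2.1,
            by rw [← hx.2.2.1]; exact hx.2.2.2⟩)]
      · rw [if_neg hl, if_neg (fun hx => hl hx.1)]
    rw [hent]
    by_cases hmem : ∃ q ∈ its, q.2.length = 1 ∧ c < n ∧ r = q.2.headD 0 ∧ pvCell colors r c ≠ q.1
    · rw [if_pos hmem, if_pos (by obtain ⟨q, hq, hp⟩ := hmem; exact ⟨q, List.mem_cons_of_mem _ hq, hp⟩)]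
    · rw [if_neg hmem]
      by_cases hhead : pr.2.length = 1 ∧ c < n ∧ r = pr.2.headD 0 ∧ pvCell colors r c ≠ pr.1
      · rw [if_pos hhead, if_pos ⟨pr, List.mem_cons_self, hhead⟩]
      · rw [if_neg hhead, if_neg]
        rintro ⟨q, hq, hp⟩
        rcases List.mem_cons.mp hq with h | h
        · exact hhead (h ▸ hp)
        · exact hmem ⟨q, h, hp⟩

def pvPairs (a b : Nat) : List (Nat × Nat) :=
  (List.range a).flatMap (fun o => (List.range b).map (fun i => (o, i)))

-- occurrence of color x with recorded index u, over a pair list L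
def pvOcc (L : List (Nat × Nat)) (k : Nat × Nat → String) (v : Nat × Nat → Nat)
    (x : String) (u : Nat) : Prop :=
  ∃ p ∈ L, k p = x ∧ v p = u

theorem pvMem_pairs (a b : Nat) (p : Nat × Nat) : p ∈ pvPairs a b ↔ p.1 < a ∧ p.2 < b := by
  cases p with
  | mk o i =>
    simp only [pvPairs, List.mem_flatMap, List.mem_map, List.mem_range]
    constructor
    · rintro ⟨o', ho', i', hi', h⟩
      cases h; exact ⟨ho', hi'⟩
    · rintro ⟨h1, h2⟩; exact ⟨o, h1, i, h2, rfl⟩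

theorem pvFoldl2 {σ : Type} (f : σ → Nat → Nat → σ) (os is : List Nat) :
    ∀ (init : σ),
      os.foldl (fun d o => is.foldl (fun d i => f d o i) d) init
        = ((List.flatMap (fun o => is.map (fun i => (o, i))) os)).foldl (fun d p => f d p.1 p.2) init := by
  induction os with
  | nil => intro init; rfl
  | cons o os ih =>
    intro init
    simp only [List.foldl_cons, List.flatMap_cons, List.foldl_append, List.foldl_map]
    exact ih _

theorem pvOcc_append (L : List (Nat × Nat)) (p : Nat × Nat) (k : Nat × Nat → String)
    (v : Nat × Nat → Nat) (x : String) (u : Nat) :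
    pvOcc (L ++ [p]) k v x u ↔ pvOcc L k v x u ∨ (k p = x ∧ v p = u) := by
  simp only [pvOcc, List.mem_append, List.mem_singleton]
  constructor
  · rintro ⟨q, hq | hq, h⟩
    · exact Or.inl ⟨q, hq, h⟩
    · subst hq; exact Or.inr h
  · rintro (⟨q, hq, h⟩ | h)
    · exact ⟨q, Or.inl hq, h⟩
    · exact ⟨p, Or.inr rfl, h⟩

theorem pvGenDict_keys (k : Nat × Nat → String) (v : Nat × Nat → Nat) (L : List (Nat × Nat)) :
    (L.foldl (fun d p => d.modify (k p) PySem.Set.empty (fun s => PySem.Set.add s (v p)))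
      PySem.Dict.empty).keys = PySem.Set.ofList (L.map k) := by
  rw [PySem.Dict.keys_foldl_modify_key L k PySem.Set.empty (fun _ p s => PySem.Set.add s (v p))
    PySem.Dict.empty]
  simp [PySem.Set.update_nil_left]

theorem pvGenDict_spec (k : Nat × Nat → String) (v : Nat × Nat → Nat) (L : List (Nat × Nat)) :
    ∀ (x : String),
      ((L.foldl (fun d p => d.modify (k p) PySem.Set.empty (fun s => PySem.Set.add s (v p)))
          PySem.Dict.empty).getD x PySem.Set.empty).Nodup
      ∧ ∀ u, (u ∈ (L.foldl (fun d p => d.modify (k p) PySem.Set.empty (fun s => PySem.Set.add s (v p)))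
          PySem.Dict.empty).getD x PySem.Set.empty ↔ pvOcc L k v x u) := by
  induction L using List.reverseRecOn with
  | nil => intro x; refine ⟨List.nodup_nil, ?_⟩; intro u; simp [pvOcc, PySem.Dict.getD_empty, PySem.Set.empty]
  | append_singleton L p ih =>
    intro x
    rw [List.foldl_append]
    simp only [List.foldl_cons, List.foldl_nil]
    rw [show ∀ d : PySem.Dict String (PySem.Set Nat),
        (d.modify (k p) PySem.Set.empty (fun s => PySem.Set.add s (v p))).getD x PySem.Set.empty
        = if x = k p then PySem.Set.add (d.getD (k p) PySem.Set.empty) (v p) else d.getD x PySem.Set.empty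
      from fun d => PySem.Dict.getD_modify d (k p) x PySem.Set.empty _]
    have hocc : ∀ u, pvOcc (L ++ [p]) k v x u ↔ pvOcc L k v x u ∨ (k p = x ∧ v p = u) :=
      fun u => pvOcc_append L p k v x u
    by_cases hx : x = k p
    · rw [if_pos hx]
      obtain ⟨ihn, ihm⟩ := ih (k p)
      refine ⟨PySem.Set.nodup_add _ _ ihn, ?_⟩
      intro u
      rw [hocc u, PySem.Set.mem_add]
      subst hx
      rw [ihm u]
      tauto
    · rw [if_neg hx]
      obtain ⟨ihn, ihm⟩ := ih x
      refine ⟨ihn, ?_⟩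
      intro u
      rw [hocc u, ihm u]
      constructor
      · exact Or.inl
      · rintro (h | ⟨h1, h2⟩)
        · exact h
        · exact absurd h1.symm hx

theorem pvGenDict_contains (k : Nat × Nat → String) (v : Nat × Nat → Nat) (L : List (Nat × Nat))
    (x : String) :
    (L.foldl (fun d p => d.modify (k p) PySem.Set.empty (fun s => PySem.Set.add s (v p)))
        PySem.Dict.empty).contains x = true ↔ ∃ p ∈ L, k p = x := by
  rw [PySem.Dict.contains_iff_mem_keys, pvGenDict_keys]
  simp [PySem.Set.mem_ofList, List.mem_map]

theorem pvList_eq_singleton {c : Nat} {s : List Nat} (hnd : s.Nodup) (hc : c ∈ s)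
    (hall : ∀ u ∈ s, u = c) : s = [c] := by
  cases s with
  | nil => cases hc
  | cons a t =>
    have ha : a = c := hall a List.mem_cons_self
    cases t with
    | nil => rw [ha]
    | cons b t2 =>
      exfalso
      have hb : b = c := hall b (by simp)
      have : a ∈ b :: t2 := by rw [ha, ← hb]; exact List.mem_cons_self
      exact (List.nodup_cons.mp hnd).1 this

theorem pvAcond_iff (k : Nat × Nat → String) (v : Nat × Nat → Nat) (L : List (Nat × Nat))
    (c : Nat) (Q : String → Prop) :
    (∃ pr ∈ (L.foldl (fun d p => d.modify (k p) PySem.Set.empty (fun s => PySem.Set.add s (v p)))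
        PySem.Dict.empty).items, pr.2.length = 1 ∧ c = pr.2.headD 0 ∧ Q pr.1)
      ↔ ∃ x, Q x ∧ pvOcc L k v x c ∧ ∀ u, pvOcc L k v x u → u = c := by
  have hnd : (L.foldl (fun d p => d.modify (k p) PySem.Set.empty (fun s => PySem.Set.add s (v p)))
      PySem.Dict.empty).keys.Nodup := by
    rw [pvGenDict_keys]; exact PySem.Set.nodup_ofList _
  constructor
  · rintro ⟨⟨x, s⟩, hmem, hlen, hc, hQ⟩
    have hget := (PySem.Dict.get?_eq_some_iff_mem_items _ x s hnd).mpr hmem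
    have hgetD : (L.foldl (fun d p => d.modify (k p) PySem.Set.empty (fun s => PySem.Set.add s (v p)))
        PySem.Dict.empty).getD x PySem.Set.empty = s := PySem.Dict.getD_of_get?_eq_some _ PySem.Set.empty hget
    obtain ⟨hsnd, hsm⟩ := pvGenDict_spec k v L x
    rw [hgetD] at hsnd hsm
    obtain ⟨a, ha⟩ := List.length_eq_one_iff.mp hlen
    subst ha
    simp only [List.headD_cons] at hc
    subst hc
    refine ⟨x, hQ, ?_, ?_⟩
    · exact (hsm _).mp List.mem_cons_self
    · intro u hu
      have : u ∈ [c] := (hsm u).mpr hu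
      simpa using this
  · rintro ⟨x, hQ, hocc, huniq⟩
    obtain ⟨hsnd, hsm⟩ := pvGenDict_spec k v L x
    have hcont : (L.foldl (fun d p => d.modify (k p) PySem.Set.empty (fun s => PySem.Set.add s (v p)))
        PySem.Dict.empty).contains x = true := by
      rw [pvGenDict_contains]
      obtain ⟨p, hp, hkp, _⟩ := hocc
      exact ⟨p, hp, hkp⟩
    have hsome : ((L.foldl (fun d p => d.modify (k p) PySem.Set.empty (fun s => PySem.Set.add s (v p)))
        PySem.Dict.empty).get? x).isSome = true := by
      rw [← PySem.Dict.contains_eq_isSome_get?]; exact hcont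
    obtain ⟨s, hs⟩ := Option.isSome_iff_exists.mp hsome
    have hgetD : (L.foldl (fun d p => d.modify (k p) PySem.Set.empty (fun s => PySem.Set.add s (v p)))
        PySem.Dict.empty).getD x PySem.Set.empty = s :=
      PySem.Dict.getD_of_get?_eq_some _ PySem.Set.empty hs
    rw [hgetD] at hsnd hsm
    have hseq : s = [c] :=
      pvList_eq_singleton hsnd ((hsm c).mpr hocc) (fun u hu => huniq u ((hsm u).mp hu))
    refine ⟨(x, s), (PySem.Dict.get?_eq_some_iff_mem_items _ x s hnd).mp hs, ?_, ?_, hQ⟩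
    · rw [hseq]; rfl
    · rw [hseq]; rfl

theorem pvNote_keys_nodup (d : PySem.Dict String (Option Nat)) (x : String) (kk : Nat)
    (h : d.keys.Nodup) : (pvNote d x kk).keys.Nodup := by
  unfold pvNote
  split_ifs <;> first
    | exact PySem.Dict.nodup_keys_insert _ _ _ h
    | exact h

theorem pvGenNote_keys_nodup (k : Nat × Nat → String) (v : Nat × Nat → Nat) :
    ∀ (L : List (Nat × Nat)) (d : PySem.Dict String (Option Nat)), d.keys.Nodup →
      (L.foldl (fun d p => pvNote d (k p) (v p)) d).keys.Nodup := by
  intro L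
  induction L with
  | nil => intro d h; exact h
  | cons p L ih => intro d h; exact ih _ (pvNote_keys_nodup d (k p) (v p) h)

-- the state machine pvNote implements on a single key
def pvCollapse : Option (Option Nat) → Nat → Option (Option Nat)
  | none, u => some (some u)
  | some (some w), u => if w = u then some (some w) else some none
  | some none, _ => some none

def pvVals (L : List (Nat × Nat)) (k : Nat × Nat → String) (v : Nat × Nat → Nat)
    (x : String) : List Nat :=
  (L.filter (fun p => decide (k p = x))).map v

theorem pvNote_get?_self (d : PySem.Dict String (Option Nat)) (x : String) (kk : Nat) :
    (pvNote d x kk).get? x = pvCollapse (d.get? x) kk := by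
  unfold pvNote
  cases h : d.get? x with
  | none =>
    have hc : d.contains x = false := by
      rw [PySem.Dict.contains_eq_isSome_get?, h]; rfl
    rw [if_neg (by simp [hc]), PySem.Dict.get?_insert, if_pos rfl, pvCollapse]
  | some o =>
    have hc : d.contains x = true := by
      rw [PySem.Dict.contains_eq_isSome_get?, h]; rfl
    have hgetD : d.getD x none = o := PySem.Dict.getD_of_get?_eq_some _ none h
    rw [if_pos hc, hgetD]
    cases o with
    | none =>
      rw [if_pos (by simp), PySem.Dict.get?_insert, if_pos rfl, pvCollapse]
    | some w =>
      by_cases hw : w = kk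
      · rw [if_neg (by simp [hw]), h, pvCollapse, if_pos hw]
      · rw [if_pos (by simp [hw]), PySem.Dict.get?_insert, if_pos rfl, pvCollapse, if_neg hw]

theorem pvNote_get?_other (d : PySem.Dict String (Option Nat)) (x y : String) (kk : Nat)
    (h : y ≠ x) : (pvNote d y kk).get? x = d.get? x := by
  unfold pvNote
  split_ifs <;> first
    | rw [PySem.Dict.get?_insert, if_neg (fun hx => h hx.symm)]
    | rfl

theorem pvCollapse_foldl_some_none (vs : List Nat) :
    vs.foldl pvCollapse (some none) = some none := by
  induction vs with
  | nil => rfl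
  | cons w vs ih => simpa [pvCollapse] using ih

theorem pvCollapse_foldl_some_some (vs : List Nat) :
    ∀ (u : Nat), vs.foldl pvCollapse (some (some u))
      = if ∀ w ∈ vs, w = u then some (some u) else some none := by
  induction vs with
  | nil => intro u; simp
  | cons w vs ih =>
    intro u
    simp only [List.foldl_cons, pvCollapse]
    have hiff : (∀ w' ∈ w :: vs, w' = u) ↔ (w = u ∧ ∀ w' ∈ vs, w' = u) := by
      constructor
      · intro h
        exact ⟨h w List.mem_cons_self, fun w' hw' => h w' (List.mem_cons_of_mem _ hw')⟩
      · rintro ⟨h1, h2⟩ w' hw'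
        rcases List.mem_cons.mp hw' with h3 | h3
        · exact h3.trans h1
        · exact h2 w' h3
    by_cases hw : u = w
    · rw [if_pos hw, ih u]
      by_cases hall : ∀ w' ∈ vs, w' = u
      · rw [if_pos hall, if_pos (hiff.mpr ⟨hw.symm, hall⟩)]
      · rw [if_neg hall, if_neg (fun hx => hall (hiff.mp hx).2)]
    · rw [if_neg hw, pvCollapse_foldl_some_none,
        if_neg (fun hx => hw ((hiff.mp hx).1).symm)]

theorem pvCollapse_foldl_none_eq_some (vs : List Nat) (u : Nat) :
    vs.foldl pvCollapse none = some (some u) ↔ u ∈ vs ∧ ∀ w ∈ vs, w = u := by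
  cases vs with
  | nil => simp
  | cons w vs =>
    simp only [List.foldl_cons, pvCollapse]
    rw [pvCollapse_foldl_some_some]
    constructor
    · intro h
      split_ifs at h with hall
      · injection h with h'; injection h' with h''
        subst h''
        exact ⟨List.mem_cons_self, by
          intro w' hw'
          rcases List.mem_cons.mp hw' with h | h
          exacts [h, hall w' h]⟩
      · cases h
    · rintro ⟨hu, hall⟩
      have hw : w = u := hall w List.mem_cons_self
      subst hw
      rw [if_pos (fun w' hw' => hall w' (List.mem_cons_of_mem _ hw'))]

theorem pvGenNote_get? (k : Nat × Nat → String) (v : Nat × Nat → Nat) (L : List (Nat × Nat)) :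
    ∀ (x : String),
      (L.foldl (fun d p => pvNote d (k p) (v p)) PySem.Dict.empty).get? x
        = (pvVals L k v x).foldl pvCollapse none := by
  induction L using List.reverseRecOn with
  | nil => intro x; simp [pvVals, PySem.Dict.get?_empty]
  | append_singleton L p ih =>
    intro x
    rw [List.foldl_append]
    simp only [List.foldl_cons, List.foldl_nil]
    by_cases h : k p = x
    · subst h
      have hvals : pvVals (L ++ [p]) k v (k p) = pvVals L k v (k p) ++ [v p] := by
        simp [pvVals, List.filter_append]
      rw [hvals, List.foldl_append, pvNote_get?_self, ih (k p)]
      rfl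
    · have hvals : pvVals (L ++ [p]) k v x = pvVals L k v x := by
        simp [pvVals, List.filter_append, h]
      rw [hvals, pvNote_get?_other _ x (k p) (v p) h, ih x]

theorem pvOcc_iff_mem_vals (L : List (Nat × Nat)) (k : Nat × Nat → String)
    (v : Nat × Nat → Nat) (x : String) (u : Nat) :
    pvOcc L k v x u ↔ u ∈ pvVals L k v x := by
  simp only [pvOcc, pvVals, List.mem_map, List.mem_filter, decide_eq_true_eq]
  constructor
  · rintro ⟨p, hp, h1, h2⟩; exact ⟨p, ⟨hp, h1⟩, h2⟩
  · rintro ⟨p, ⟨hp, h1⟩, h2⟩; exact ⟨p, hp, h1, h2⟩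

theorem pvGenNote_some_iff (k : Nat × Nat → String) (v : Nat × Nat → Nat)
    (L : List (Nat × Nat)) (x : String) (u : Nat) :
    (L.foldl (fun d p => pvNote d (k p) (v p)) PySem.Dict.empty).get? x = some (some u)
      ↔ pvOcc L k v x u ∧ ∀ w, pvOcc L k v x w → w = u := by
  rw [pvGenNote_get?, pvCollapse_foldl_none_eq_some]
  constructor
  · rintro ⟨h1, h2⟩
    exact ⟨(pvOcc_iff_mem_vals L k v x u).mpr h1,
      fun w hw => h2 w ((pvOcc_iff_mem_vals L k v x w).mp hw)⟩
  · rintro ⟨h1, h2⟩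
    exact ⟨(pvOcc_iff_mem_vals L k v x u).mp h1,
      fun w hw => h2 w ((pvOcc_iff_mem_vals L k v x w).mpr hw)⟩

-- the grouping pass: distribute dict items into per-index buckets
theorem pvAccum_fold (its : List (String × Option Nat)) :
    ∀ (ls : List (PySem.Set String)),
      ((its.foldl (fun ls it => match it.2 with
          | some c => ls.set c (PySem.Set.add (ls.getD c PySem.Set.empty) it.1)
          | none => ls) ls).length = ls.length)
      ∧ ∀ (c : Nat), c < ls.length → ∀ (y : String),
          (y ∈ (its.foldl (fun ls it => match it.2 with
              | some c => ls.set c (PySem.Set.add (ls.getD c PySem.Set.empty) it.1)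
              | none => ls) ls).getD c PySem.Set.empty
            ↔ y ∈ ls.getD c PySem.Set.empty ∨ (y, some c) ∈ its) := by
  induction its with
  | nil =>
    intro ls
    exact ⟨rfl, by intro c hc y; simp⟩
  | cons it its ih =>
    intro ls
    obtain ⟨a, b⟩ := it
    have hstep : (((a, b) :: its).foldl (fun ls it => match it.2 with
          | some c => ls.set c (PySem.Set.add (ls.getD c PySem.Set.empty) it.1)
          | none => ls) ls)
        = its.foldl (fun ls it => match it.2 with
          | some c => ls.set c (PySem.Set.add (ls.getD c PySem.Set.empty) it.1)
          | none => ls) (match b with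
          | some c => ls.set c (PySem.Set.add (ls.getD c PySem.Set.empty) a)
          | none => ls) := rfl
    rw [hstep]
    set ls' := (match b with
          | some c => ls.set c (PySem.Set.add (ls.getD c PySem.Set.empty) a)
          | none => ls) with hls'
    have hlen : ls'.length = ls.length := by
      rw [hls']; cases b <;> simp
    obtain ⟨ih1, ih2⟩ := ih ls'
    refine ⟨ih1.trans hlen, ?_⟩
    intro c hc y
    rw [ih2 c (by rw [hlen]; exact hc) y]
    have hmem : y ∈ ls'.getD c PySem.Set.empty
        ↔ y ∈ ls.getD c PySem.Set.empty ∨ (y, some c) = (a, b) := by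
      rw [hls']
      cases b with
      | none =>
        simp only
        constructor
        · exact Or.inl
        · rintro (h | h)
          · exact h
          · simp at h
      | some c' =>
        simp only
        by_cases hcc : c' = c
        · subst hcc
          rw [List.getD_eq_getElem?_getD, List.getElem?_set, if_pos rfl, if_pos hc]
          simp only [Option.getD_some]
          rw [PySem.Set.mem_add]
          simp [Prod.mk.injEq]
        · rw [List.getD_eq_getElem?_getD, List.getElem?_set, if_neg hcc,
            ← List.getD_eq_getElem?_getD]
          constructor
          · exact Or.inl
          · rintro (h | h)
            · exact h
            · exfalso
              simp only [Prod.mk.injEq, Option.some.injEq] at h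
              exact hcc h.2.symm
    rw [hmem]
    rw [List.mem_cons]
    tauto

theorem pvFoldl2_pair {σ1 σ2 : Type} (f : σ1 → Nat → Nat → σ1) (g : σ2 → Nat → Nat → σ2)
    (os is : List Nat) :
    ∀ (a : σ1) (b : σ2),
      os.foldl (fun p o => is.foldl (fun p i => (f p.1 o i, g p.2 o i)) p) (a, b)
        = (os.foldl (fun d o => is.foldl (fun d i => f d o i) d) a,
           os.foldl (fun d o => is.foldl (fun d i => g d o i) d) b) := by
  induction os with
  | nil => intro a b; rfl
  | cons o os ih =>
    intro a b
    simp only [List.foldl_cons]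
    rw [PySem.List.foldl_prod_mk (fun d i => f d o i) (fun d i => g d o i) is a b]
    exact ih _ _

theorem pvFoldl_pair_nested {β γ σ1 σ2 : Type} (C : β → Prop) [DecidablePred C]
    (D : β → γ → Prop) [inst2 : ∀ p q, Decidable (D p q)]
    (f : σ1 → β → γ → σ1) (g : σ2 → β → γ → σ2) (inner : β → List γ) :
    ∀ (l : List β) (a : σ1) (b : σ2),
      l.foldl (fun acc p => if C p then
          (inner p).foldl (fun acc q => if D p q then (f acc.1 p q, g acc.2 p q) else acc) acc
        else acc) (a, b)
      = (l.foldl (fun m p => if C p then (inner p).foldl (fun m q => if D p q then f m p q else m) m else m) a,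
         l.foldl (fun m p => if C p then (inner p).foldl (fun m q => if D p q then g m p q else m) m else m) b) := by
  have hin : ∀ (p : β) (a : σ1) (b : σ2),
      (inner p).foldl (fun acc q => if D p q then (f acc.1 p q, g acc.2 p q) else acc) (a, b)
        = ((inner p).foldl (fun m q => if D p q then f m p q else m) a,
           (inner p).foldl (fun m q => if D p q then g m p q else m) b) := by
    intro p a b
    have hbody : (fun (acc : σ1 × σ2) q => if D p q then (f acc.1 p q, g acc.2 p q) else acc)
        = (fun acc q => ((if D p q then f acc.1 p q else acc.1),
            (if D p q then g acc.2 p q else acc.2))) := by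
      funext acc q; by_cases h : D p q <;> simp [h]
    rw [hbody, PySem.List.foldl_prod_mk (fun m q => if D p q then f m p q else m)
      (fun m q => if D p q then g m p q else m) (inner p) a b]
  intro l
  induction l with
  | nil => intro a b; rfl
  | cons p l ih =>
    intro a b
    simp only [List.foldl_cons]
    by_cases h : C p
    · rw [if_pos h, if_pos h, if_pos h, hin p a b, ih]
    · rw [if_neg h, if_neg h, if_neg h, ih]

-- occurrence / uniqueness of a color in a column / row
def pvOccCol (colors : List (List String)) (x : String) (c : Nat) : Prop :=
  c < (colors.getD 0 []).length ∧ ∃ r, r < colors.length ∧ pvCell colors r c = x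

def pvOccRow (colors : List (List String)) (x : String) (r : Nat) : Prop :=
  r < colors.length ∧ ∃ c, c < (colors.getD 0 []).length ∧ pvCell colors r c = x

def pvUniqueCol (colors : List (List String)) (x : String) (c : Nat) : Prop :=
  pvOccCol colors x c ∧ ∀ u, pvOccCol colors x u → u = c

def pvUniqueRow (colors : List (List String)) (x : String) (r : Nat) : Prop :=
  pvOccRow colors x r ∧ ∀ u, pvOccRow colors x u → u = r

theorem pvOccA_col (colors : List (List String)) (x : String) (u : Nat) :
    pvOcc (pvPairs (colors.getD 0 []).length colors.length)
        (fun p => pvCell colors p.2 p.1) (fun p => p.1) x u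
      ↔ pvOccCol colors x u := by
  simp only [pvOcc, pvOccCol]
  constructor
  · rintro ⟨p, hp, hk, hv⟩
    rw [pvMem_pairs] at hp
    exact ⟨hv ▸ hp.1, p.2, hp.2, by rw [← hv]; exact hk⟩
  · rintro ⟨hu, r, hr, hcell⟩
    exact ⟨(u, r), (pvMem_pairs _ _ _).mpr ⟨hu, hr⟩, hcell, rfl⟩

theorem pvOccB_col (colors : List (List String)) (x : String) (u : Nat) :
    pvOcc (pvPairs colors.length (colors.getD 0 []).length)
        (fun p => pvCell colors p.1 p.2) (fun p => p.2) x u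
      ↔ pvOccCol colors x u := by
  simp only [pvOcc, pvOccCol]
  constructor
  · rintro ⟨p, hp, hk, hv⟩
    rw [pvMem_pairs] at hp
    exact ⟨hv ▸ hp.2, p.1, hp.1, by rw [← hv]; exact hk⟩
  · rintro ⟨hu, r, hr, hcell⟩
    exact ⟨(r, u), (pvMem_pairs _ _ _).mpr ⟨hr, hu⟩, hcell, rfl⟩

theorem pvOcc_row (colors : List (List String)) (x : String) (u : Nat) :
    pvOcc (pvPairs colors.length (colors.getD 0 []).length)
        (fun p => pvCell colors p.1 p.2) (fun p => p.1) x u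
      ↔ pvOccRow colors x u := by
  simp only [pvOcc, pvOccRow]
  constructor
  · rintro ⟨p, hp, hk, hv⟩
    rw [pvMem_pairs] at hp
    exact ⟨hv ▸ hp.1, p.2, hp.2, by rw [← hv]; exact hk⟩
  · rintro ⟨hu, c, hc, hcell⟩
    exact ⟨(u, c), (pvMem_pairs _ _ _).mpr ⟨hu, hc⟩, hcell, rfl⟩

theorem pvAcondCol_iff (colors : List (List String)) (r c : Nat) (hr : r < colors.length) :
    (∃ pr ∈ ((pvPairs (colors.getD 0 []).length colors.length).foldl
        (fun d p => d.modify (pvCell colors p.2 p.1) PySem.Set.empty (fun s => PySem.Set.add s p.1))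
        PySem.Dict.empty).items,
      pr.2.length = 1 ∧ r < colors.length ∧ c = pr.2.headD 0 ∧ pvCell colors r c ≠ pr.1)
    ↔ ∃ x, pvUniqueCol colors x c ∧ pvCell colors r c ≠ x := by
  constructor
  · rintro ⟨pr, hmem, h1, _, h2, h3⟩
    obtain ⟨x, hQ, hocc, huniq⟩ := (pvAcond_iff (fun p => pvCell colors p.2 p.1) (fun p => p.1)
      (pvPairs (colors.getD 0 []).length colors.length) c (fun x => pvCell colors r c ≠ x)).mp
      ⟨pr, hmem, h1, h2, h3⟩
    exact ⟨x, ⟨(pvOccA_col colors x c).mp hocc, fun u hu => huniq u ((pvOccA_col colors x u).mpr hu)⟩, hQ⟩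
  · rintro ⟨x, ⟨hocc, huniq⟩, hne⟩
    obtain ⟨pr, hmem, h1, h2, h3⟩ := (pvAcond_iff (fun p => pvCell colors p.2 p.1) (fun p => p.1)
      (pvPairs (colors.getD 0 []).length colors.length) c (fun x => pvCell colors r c ≠ x)).mpr
      ⟨x, hne, (pvOccA_col colors x c).mpr hocc, fun u hu => huniq u ((pvOccA_col colors x u).mp hu)⟩
    exact ⟨pr, hmem, h1, hr, h2, h3⟩

theorem pvAcondRow_iff (colors : List (List String)) (r c : Nat)
    (hc : c < (colors.getD 0 []).length) :
    (∃ pr ∈ ((pvPairs colors.length (colors.getD 0 []).length).foldl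
        (fun d p => d.modify (pvCell colors p.1 p.2) PySem.Set.empty (fun s => PySem.Set.add s p.1))
        PySem.Dict.empty).items,
      pr.2.length = 1 ∧ c < (colors.getD 0 []).length ∧ r = pr.2.headD 0 ∧ pvCell colors r c ≠ pr.1)
    ↔ ∃ x, pvUniqueRow colors x r ∧ pvCell colors r c ≠ x := by
  constructor
  · rintro ⟨pr, hmem, h1, _, h2, h3⟩
    obtain ⟨x, hQ, hocc, huniq⟩ := (pvAcond_iff (fun p => pvCell colors p.1 p.2) (fun p => p.1)
      (pvPairs colors.length (colors.getD 0 []).length) r (fun x => pvCell colors r c ≠ x)).mp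
      ⟨pr, hmem, h1, h2, h3⟩
    exact ⟨x, ⟨(pvOcc_row colors x r).mp hocc, fun u hu => huniq u ((pvOcc_row colors x u).mpr hu)⟩, hQ⟩
  · rintro ⟨x, ⟨hocc, huniq⟩, hne⟩
    obtain ⟨pr, hmem, h1, h2, h3⟩ := (pvAcond_iff (fun p => pvCell colors p.1 p.2) (fun p => p.1)
      (pvPairs colors.length (colors.getD 0 []).length) r (fun x => pvCell colors r c ≠ x)).mpr
      ⟨x, hne, (pvOcc_row colors x r).mpr hocc, fun u hu => huniq u ((pvOcc_row colors x u).mp hu)⟩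
    exact ⟨pr, hmem, h1, hc, h2, h3⟩

theorem pvBcol_iff (colors : List (List String)) (r c : Nat)
    (hc : c < (colors.getD 0 []).length) :
    (((((pvPairs colors.length (colors.getD 0 []).length).foldl
          (fun d p => pvNote d (pvCell colors p.1 p.2) p.2) PySem.Dict.empty).items.foldl
        (fun ls it => match it.2 with
          | some c => ls.set c (PySem.Set.add (ls.getD c PySem.Set.empty) it.1)
          | none => ls)
        (List.replicate (colors.getD 0 []).length PySem.Set.empty)).getD c PySem.Set.empty).any
        (fun y => y ≠ pvCell colors r c) = true)
    ↔ ∃ x, pvUniqueCol colors x c ∧ pvCell colors r c ≠ x := by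
  obtain ⟨hl, hm⟩ := pvAccum_fold
    (((pvPairs colors.length (colors.getD 0 []).length).foldl
      (fun d p => pvNote d (pvCell colors p.1 p.2) p.2) PySem.Dict.empty).items)
    (List.replicate (colors.getD 0 []).length PySem.Set.empty)
  have hinit : (List.replicate (colors.getD 0 []).length (PySem.Set.empty : PySem.Set String)).getD
      c PySem.Set.empty = PySem.Set.empty := by
    rw [List.getD_eq_getElem?_getD, List.getElem?_replicate, if_pos hc]; rfl
  have hnd : ((pvPairs colors.length (colors.getD 0 []).length).foldl
      (fun d p => pvNote d (pvCell colors p.1 p.2) p.2) PySem.Dict.empty).keys.Nodup :=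
    pvGenNote_keys_nodup (fun p => pvCell colors p.1 p.2) (fun p => p.2) _ _
      PySem.Dict.nodup_keys_empty
  rw [List.any_eq_true]
  constructor
  · rintro ⟨y, hy, hne⟩
    rcases (hm c (by simpa using hc) y).mp hy with h | h
    · rw [hinit] at h; cases h
    · have hget := (PySem.Dict.get?_eq_some_iff_mem_items _ y (some c) hnd).mpr h
      obtain ⟨hocc, huniq⟩ := (pvGenNote_some_iff (fun p => pvCell colors p.1 p.2)
        (fun p => p.2) _ y c).mp hget
      refine ⟨y, ⟨⟨(pvOccB_col colors y c).mp hocc,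
        fun u hu => huniq u ((pvOccB_col colors y u).mpr hu)⟩, ?_⟩⟩
      exact Ne.symm (of_decide_eq_true hne)
  · rintro ⟨x, ⟨⟨hocc, huniq⟩, hne⟩⟩
    have hget := (pvGenNote_some_iff (fun p => pvCell colors p.1 p.2) (fun p => p.2) _ x c).mpr
      ⟨(pvOccB_col colors x c).mpr hocc, fun u hu => huniq u ((pvOccB_col colors x u).mp hu)⟩
    have hitems := (PySem.Dict.get?_eq_some_iff_mem_items _ x (some c) hnd).mp hget
    refine ⟨x, (hm c (by simpa using hc) x).mpr (Or.inr hitems), ?_⟩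
    exact decide_eq_true (Ne.symm hne)

theorem pvBrow_iff (colors : List (List String)) (r c : Nat) (hr : r < colors.length) :
    (((((pvPairs colors.length (colors.getD 0 []).length).foldl
          (fun d p => pvNote d (pvCell colors p.1 p.2) p.1) PySem.Dict.empty).items.foldl
        (fun ls it => match it.2 with
          | some c => ls.set c (PySem.Set.add (ls.getD c PySem.Set.empty) it.1)
          | none => ls)
        (List.replicate colors.length PySem.Set.empty)).getD r PySem.Set.empty).any
        (fun y => y ≠ pvCell colors r c) = true)
    ↔ ∃ x, pvUniqueRow colors x r ∧ pvCell colors r c ≠ x := by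
  obtain ⟨hl, hm⟩ := pvAccum_fold
    (((pvPairs colors.length (colors.getD 0 []).length).foldl
      (fun d p => pvNote d (pvCell colors p.1 p.2) p.1) PySem.Dict.empty).items)
    (List.replicate colors.length PySem.Set.empty)
  have hinit : (List.replicate colors.length (PySem.Set.empty : PySem.Set String)).getD
      r PySem.Set.empty = PySem.Set.empty := by
    rw [List.getD_eq_getElem?_getD, List.getElem?_replicate, if_pos hr]; rfl
  have hnd : ((pvPairs colors.length (colors.getD 0 []).length).foldl
      (fun d p => pvNote d (pvCell colors p.1 p.2) p.1) PySem.Dict.empty).keys.Nodup :=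
    pvGenNote_keys_nodup (fun p => pvCell colors p.1 p.2) (fun p => p.1) _ _
      PySem.Dict.nodup_keys_empty
  rw [List.any_eq_true]
  constructor
  · rintro ⟨y, hy, hne⟩
    rcases (hm r (by simpa using hr) y).mp hy with h | h
    · rw [hinit] at h; cases h
    · have hget := (PySem.Dict.get?_eq_some_iff_mem_items _ y (some r) hnd).mpr h
      obtain ⟨hocc, huniq⟩ := (pvGenNote_some_iff (fun p => pvCell colors p.1 p.2)
        (fun p => p.1) _ y r).mp hget
      refine ⟨y, ⟨⟨(pvOcc_row colors y r).mp hocc,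
        fun u hu => huniq u ((pvOcc_row colors y u).mpr hu)⟩, ?_⟩⟩
      exact Ne.symm (of_decide_eq_true hne)
  · rintro ⟨x, ⟨⟨hocc, huniq⟩, hne⟩⟩
    have hget := (pvGenNote_some_iff (fun p => pvCell colors p.1 p.2) (fun p => p.1) _ x r).mpr
      ⟨(pvOcc_row colors x r).mpr hocc, fun u hu => huniq u ((pvOcc_row colors x u).mp hu)⟩
    have hitems := (PySem.Dict.get?_eq_some_iff_mem_items _ x (some r) hnd).mp hget
    refine ⟨x, (hm r (by simpa using hr) x).mpr (Or.inr hitems), ?_⟩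
    exact decide_eq_true (Ne.symm hne)

theorem pvPairs_eq (a b : Nat) :
    List.flatMap (fun o => (List.range b).map (fun i => (o, i))) (List.range a) = pvPairs a b := rfl

theorem pvEnt_getElem {α : Type} (m : List (List α)) (r c : Nat) (d : α) (hr : r < m.length)
    (hc : c < m[r].length) : m[r][c] = (m.getD r []).getD c d := by
  have h1 : m.getD r [] = m[r] := by
    rw [List.getD_eq_getElem?_getD, List.getElem?_eq_getElem hr]; rfl
  rw [h1, List.getD_eq_getElem?_getD, List.getElem?_eq_getElem hc]; rfl

theorem pvAB_component {α : Type} (colors : List (List String)) (w e : α) :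
    ((((pvPairs colors.length (colors.getD 0 []).length).foldl
        (fun d p => d.modify (pvCell colors p.1 p.2) PySem.Set.empty (fun s => PySem.Set.add s p.1))
        PySem.Dict.empty).items).foldl
      (fun m p => if p.2.length = 1 then
          (List.range (colors.getD 0 []).length).foldl
            (fun m q => if pvCell colors (p.2.headD 0) q ≠ p.1 then pvSet2 m (p.2.headD 0) q w else m) m
        else m)
      ((((pvPairs (colors.getD 0 []).length colors.length).foldl
          (fun d p => d.modify (pvCell colors p.2 p.1) PySem.Set.empty (fun s => PySem.Set.add s p.1))
          PySem.Dict.empty).items).foldl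
        (fun m p => if p.2.length = 1 then
            (List.range colors.length).foldl
              (fun m q => if pvCell colors q (p.2.headD 0) ≠ p.1 then pvSet2 m q (p.2.headD 0) w else m) m
          else m)
        (List.replicate colors.length (List.replicate (colors.getD 0 []).length e))))
    = (List.range colors.length).map (fun r => (List.range (colors.getD 0 []).length).map (fun c =>
        if (((((pvPairs colors.length (colors.getD 0 []).length).foldl
                (fun d p => pvNote d (pvCell colors p.1 p.2) p.2) PySem.Dict.empty).items.foldl
              (fun ls it => match it.2 with
                | some c => ls.set c (PySem.Set.add (ls.getD c PySem.Set.empty) it.1)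
                | none => ls)
              (List.replicate (colors.getD 0 []).length PySem.Set.empty)).getD c PySem.Set.empty).any
              (fun y => y ≠ pvCell colors r c)
            || ((((pvPairs colors.length (colors.getD 0 []).length).foldl
                (fun d p => pvNote d (pvCell colors p.1 p.2) p.1) PySem.Dict.empty).items.foldl
              (fun ls it => match it.2 with
                | some c => ls.set c (PySem.Set.add (ls.getD c PySem.Set.empty) it.1)
                | none => ls)
              (List.replicate colors.length PySem.Set.empty)).getD r PySem.Set.empty).any
              (fun y => y ≠ pvCell colors r c)) = true
        then w else e)) := by
  have Hc := pvColPass_fold colors colors.length w (((pvPairs (colors.getD 0 []).length colors.length).foldl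
      (fun d p => d.modify (pvCell colors p.2 p.1) PySem.Set.empty (fun s => PySem.Set.add s p.1))
      PySem.Dict.empty).items) (List.replicate colors.length (List.replicate (colors.getD 0 []).length e))
  have Hr := pvRowPass_fold colors (colors.getD 0 []).length w (((pvPairs colors.length (colors.getD 0 []).length).foldl
      (fun d p => d.modify (pvCell colors p.1 p.2) PySem.Set.empty (fun s => PySem.Set.add s p.1))
      PySem.Dict.empty).items)
    ((((pvPairs (colors.getD 0 []).length colors.length).foldl
      (fun d p => d.modify (pvCell colors p.2 p.1) PySem.Set.empty (fun s => PySem.Set.add s p.1))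
      PySem.Dict.empty).items).foldl (fun m p => if p.2.length = 1 then
        (List.range colors.length).foldl
          (fun m q => if pvCell colors q (p.2.headD 0) ≠ p.1 then pvSet2 m q (p.2.headD 0) w else m) m
      else m) (List.replicate colors.length (List.replicate (colors.getD 0 []).length e)))
  have hclen := Hc.1
  have hcent := Hc.2
  have hrlen := Hr.1
  have hrent := Hr.2
  apply List.ext_getElem
  · rw [pvLen_congr hrlen, pvLen_congr hclen]
    simp
  · intro r h1 h2
    have hr : r < colors.length := by simpa using h2
    have hm0row : ((List.replicate colors.length (List.replicate (colors.getD 0 []).length e)).getD r []).length = (colors.getD 0 []).length := by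
      rw [List.getD_eq_getElem?_getD, List.getElem?_replicate, if_pos hr]
      simp
    have hcolrow : (((((pvPairs (colors.getD 0 []).length colors.length).foldl
      (fun d p => d.modify (pvCell colors p.2 p.1) PySem.Set.empty (fun s => PySem.Set.add s p.1))
      PySem.Dict.empty).items).foldl (fun m p => if p.2.length = 1 then
        (List.range colors.length).foldl
          (fun m q => if pvCell colors q (p.2.headD 0) ≠ p.1 then pvSet2 m q (p.2.headD 0) w else m) m
      else m) (List.replicate colors.length (List.replicate (colors.getD 0 []).length e))).getD r []).length = (colors.getD 0 []).length := by
      rw [pvRowlen_congr hclen r, hm0row]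
    simp only [List.getElem_map, List.getElem_range]
    apply List.ext_getElem
    · have hgd : ∀ (m' : List (List α)) (hr2 : r < m'.length),
          m'[r].length = (m'.getD r []).length := by
        intro m' hr2
        rw [List.getD_eq_getElem?_getD, List.getElem?_eq_getElem hr2]
        rfl
      rw [hgd _ h1, pvRowlen_congr hrlen r, hcolrow]
      simp
    · intro c h3 h4
      have hc : c < (colors.getD 0 []).length := by simpa using h4
      simp only [List.getElem_map, List.getElem_range]
      refine (pvEnt_getElem _ r c e h1 h3).trans ?_
      have hcR : c < (((((pvPairs (colors.getD 0 []).length colors.length).foldl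
          (fun d p => d.modify (pvCell colors p.2 p.1) PySem.Set.empty (fun s => PySem.Set.add s p.1))
          PySem.Dict.empty).items).foldl (fun m p => if p.2.length = 1 then
            (List.range colors.length).foldl
              (fun m q => if pvCell colors q (p.2.headD 0) ≠ p.1 then pvSet2 m q (p.2.headD 0) w else m) m
          else m) (List.replicate colors.length (List.replicate (colors.getD 0 []).length e))).getD r []).length := by
        rw [hcolrow]; exact hc
      have hcC : c < ((List.replicate colors.length (List.replicate (colors.getD 0 []).length e)).getD r []).length := by
        rw [hm0row]; exact hc
      have hm0ent : ((List.replicate colors.length (List.replicate (colors.getD 0 []).length e)).getD r []).getD c e = e := by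
        have hrow : (List.replicate colors.length (List.replicate (colors.getD 0 []).length e)).getD r []
            = List.replicate (colors.getD 0 []).length e := by
          rw [List.getD_eq_getElem?_getD, List.getElem?_replicate, if_pos hr]
          rfl
        rw [hrow, List.getD_eq_getElem?_getD, List.getElem?_replicate]
        split_ifs
        all_goals rfl
      rw [hrent r c e hcR, hcent r c e hcC, hm0ent]
      have hCondC := pvAcondCol_iff colors r c hr
      have hCondR := pvAcondRow_iff colors r c hc
      have hBc := pvBcol_iff colors r c hc
      have hBr := pvBrow_iff colors r c hr
      by_cases hQ : (∃ x, pvUniqueRow colors x r ∧ pvCell colors r c ≠ x)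
      · rw [if_pos (hCondR.mpr hQ), hBr.mpr hQ, Bool.or_true, if_pos rfl]
      · rw [if_neg (fun hx => hQ (hCondR.mp hx)),
          Bool.eq_false_iff.mpr (fun hx => hQ (hBr.mp hx)), Bool.or_false]
        by_cases hP : (∃ x, pvUniqueCol colors x c ∧ pvCell colors r c ≠ x)
        · rw [if_pos (hCondC.mpr hP), hBc.mpr hP, if_pos rfl]
        · rw [if_neg (fun hx => hP (hCondC.mp hx)),
            Bool.eq_false_iff.mpr (fun hx => hP (hBc.mp hx))]
          simp

set_option maxHeartbeats 1000000 in
theorem pv_main (colors : List (List String)) :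
    filter_single_color_blocks colors = filter_single_color_blocks_alt colors := by
  unfold filter_single_color_blocks filter_single_color_blocks_alt
  simp only []
  rw [pvFoldl2 (fun d o i => d.modify (pvCell colors i o) PySem.Set.empty
      (fun s => PySem.Set.add s o)) (List.range (colors.getD 0 []).length)
      (List.range colors.length) PySem.Dict.empty,
    pvFoldl2 (fun d o i => d.modify (pvCell colors o i) PySem.Set.empty
      (fun s => PySem.Set.add s o)) (List.range colors.length)
      (List.range (colors.getD 0 []).length) PySem.Dict.empty,
    pvPairs_eq (colors.getD 0 []).length colors.length,
    pvPairs_eq colors.length (colors.getD 0 []).length]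
  rw [pvFoldl_pair_nested (fun pr : String × PySem.Set Nat => pr.2.length = 1)
      (fun pr row => pvCell colors row (pr.2.headD 0) ≠ pr.1)
      (fun m pr row => pvSet2 m row (pr.2.headD 0) "0")
      (fun m pr row => pvSet2 m row (pr.2.headD 0) (1 : Int))
      (fun _ => List.range colors.length) _ _ _]
  rw [pvFoldl_pair_nested (fun pr : String × PySem.Set Nat => pr.2.length = 1)
      (fun pr col => pvCell colors (pr.2.headD 0) col ≠ pr.1)
      (fun m pr col => pvSet2 m (pr.2.headD 0) col "0")
      (fun m pr col => pvSet2 m (pr.2.headD 0) col (1 : Int))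
      (fun _ => List.range (colors.getD 0 []).length) _ _ _]
  rw [pvFoldl2_pair (fun d o i => pvNote d (pvCell colors o i) i)
      (fun d o i => pvNote d (pvCell colors o i) o)
      (List.range colors.length) (List.range (colors.getD 0 []).length)
      PySem.Dict.empty PySem.Dict.empty]
  simp only []
  rw [pvFoldl2 (fun d o i => pvNote d (pvCell colors o i) i)
      (List.range colors.length) (List.range (colors.getD 0 []).length) PySem.Dict.empty,
    pvFoldl2 (fun d o i => pvNote d (pvCell colors o i) o)
      (List.range colors.length) (List.range (colors.getD 0 []).length) PySem.Dict.empty,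
    pvPairs_eq colors.length (colors.getD 0 []).length]
  simp only [List.map_map, Function.comp_def]
  rw [Prod.mk.injEq]
  constructor
  · exact pvAB_component colors "0" "_"
  · exact pvAB_component colors (1 : Int) 0

-- ===== VERDICT (by name: the statement is the Claim_ definition above) =====
theorem filter_single_color_blocks_spec : Claim_equal_filter_single_color_blocks := by
  intro colors _ _
  exact pv_main colors
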